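-- pv_equiv track=rewrite | github.com/namtroi/RAGBase | apps/ai-worker/src/pptx_processor.py | _add_slide_markers
-- ===== SOURCE A (Python) =====
-- def _add_slide_markers(markdown: str) -> str:
--     """
--     Add slide markers between sections.
--     Converts double newlines before headings to slide separators.
--     """
--     if not markdown:
--         return markdown
--
--     lines = markdown.split("\n")
--     result = []
--     prev_blank = False
--
--     for i, line in enumerate(lines):
--         # Check if this is a top-level heading after blank lines
--         if line.startswith("# ") and prev_blank and result:
--             # Replace last blank line with slide marker
--             if result and result[-1] == "":
--                 result[-1] = "<!-- slide -->"
--                 result.append("")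
--
--         result.append(line)
--         prev_blank = line == ""
--
--     return "\n".join(result)
-- ===== SOURCE B (Python) =====
-- def _add_slide_markers(markdown: str) -> str:
--     # Whole-string rewrite: every "\n\n# " occurrence becomes the slide break,
--     # and a leading "\n# " gets the marker prepended; no line list, no state.
--     out = markdown.replace("\n\n# ", "\n<!-- slide -->\n\n# ")
--     if out.startswith("\n# "):
--         out = "<!-- slide -->\n" + out
--     return out
-- ===== Notes on version B (the rewrite author's own statement) =====
-- stated objective: idiomatic
-- what changed: Replaces the split-into-lines loop with prev_blank state and result[-1] back-patching by one whole-string str.replace of the blank-line-before-heading character pattern plus a startswith check that prepends the marker when the string opens with a blank line before a heading.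
import Mathlib
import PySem

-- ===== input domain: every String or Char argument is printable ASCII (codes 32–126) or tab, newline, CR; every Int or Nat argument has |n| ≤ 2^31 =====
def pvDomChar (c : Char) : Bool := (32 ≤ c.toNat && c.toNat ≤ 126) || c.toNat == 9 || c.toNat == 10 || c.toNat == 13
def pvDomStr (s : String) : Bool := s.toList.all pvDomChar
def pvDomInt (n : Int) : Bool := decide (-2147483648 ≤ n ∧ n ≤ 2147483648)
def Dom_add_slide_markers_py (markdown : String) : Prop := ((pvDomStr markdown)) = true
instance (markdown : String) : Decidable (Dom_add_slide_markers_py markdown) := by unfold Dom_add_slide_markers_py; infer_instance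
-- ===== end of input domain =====

-- B replaces A's split-into-lines loop (prev_blank state, result[-1] back-patching) by one
-- whole-string replace of the blank-line-before-heading pattern plus a startswith check for a leading blank line.

-- ===== PORT A =====
-- "<!-- slide -->" as a character list (shared string constant of both programs)
def markerL : List Char := ['<', '!', '-', '-', ' ', 's', 'l', 'i', 'd', 'e', ' ', '-', '-', '>']

-- the 'for i, line in enumerate(lines)' loop of A, carried state: result, prev_blank
def loopA : List (List Char) → List (List Char) → Bool → List (List Char)
  | [], result, _ => result
  | line :: rest, result, prevBlank =>
    let result' :=
      if PySem.Chars.startswith line ['#', ' '] && prevBlank && !result.isEmpty then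
        if !result.isEmpty && (result.getLast? == some ([] : List Char)) then
          result.dropLast ++ [markerL, []]        -- result[-1] = "<!-- slide -->"; result.append("")
        else result
      else result
    loopA rest (result' ++ [line]) (line == ([] : List Char))

def add_slide_markers_py (markdown : String) : String :=
  if markdown == "" then markdown
  else
    let lines := PySem.Chars.splitOn markdown.toList ['\n']
    String.ofList (PySem.Chars.join ['\n'] (loopA lines [] false))

-- ===== PORT B =====
def add_slide_markers_py_alt (markdown : String) : String :=
  let out := PySem.Chars.replace markdown.toList ['\n', '\n', '#', ' ']
      ('\n' :: markerL ++ ['\n', '\n', '#', ' '])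
  String.ofList
    (if PySem.Chars.startswith out ['\n', '#', ' '] then markerL ++ '\n' :: out else out)

-- ===== PRECONDITION & SPEC =====
def Spec_add_slide_markers_py (markdown : String) (out : String) : Prop := out = add_slide_markers_py_alt markdown
instance (markdown : String) (out : String) : Decidable (Spec_add_slide_markers_py markdown out) := by unfold Spec_add_slide_markers_py; infer_instance

-- ===== CLAIM (what is proved, stated in full; the proofs are below) =====
def Claim_equal_add_slide_markers_py : Prop := ∀ (markdown : String), Dom_add_slide_markers_py markdown → Spec_add_slide_markers_py markdown (add_slide_markers_py markdown)

-- ===== LEMMAS AND PROOFS =====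

-- splitting a string at '\n' (reference recursion)
def glueL (p : List Char) : List (List Char) → List (List Char)
  | [] => [p]
  | r :: rs => (p ++ r) :: rs

def splitNL : List Char → List (List Char)
  | [] => [[]]
  | c :: t => if c = '\n' then [] :: splitNL t else glueL [c] (splitNL t)

-- joining with '\n' (reference recursion)
def joinNL : List (List Char) → List Char
  | [] => []
  | l :: [] => l
  | l :: l2 :: ls => l ++ '\n' :: joinNL (l2 :: ls)

-- what A's loop computes, with the back-patching of result[-1] turned into plain output
def gA (p : List Char) : List (List Char) → List (List Char)
  | [] => [p]
  | l :: rest =>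
    if PySem.Chars.startswith l ['#', ' '] && (p == ([] : List Char)) then
      markerL :: [] :: gA l rest
    else p :: gA l rest

def GA : List (List Char) → List (List Char)
  | [] => []
  | l :: ls => gA l ls

-- what B's replace computes (reference recursion)
def repl : List Char → List Char
  | [] => []
  | c :: cs =>
    if ['\n', '\n', '#', ' '].isPrefixOf (c :: cs) then
      ('\n' :: markerL ++ ['\n', '\n', '#', ' ']) ++ repl (cs.drop 3)
    else c :: repl cs
termination_by l => l.length
decreasing_by all_goals simp

lemma splitNL_ne_nil (s : List Char) : splitNL s ≠ [] := by
  cases s with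
  | nil => simp [splitNL]
  | cons c t =>
    simp only [splitNL]
    split
    · simp
    · cases h : splitNL t <;> simp [glueL]

lemma splitNL_cons (s : List Char) : ∃ r rs, splitNL s = r :: rs := by
  cases h : splitNL s with
  | nil => exact absurd h (splitNL_ne_nil s)
  | cons r rs => exact ⟨r, rs, rfl⟩

lemma splitOn_go_eq : ∀ (fuel : Nat) (l cur : List Char) (accs : List (List Char)),
    l.length ≤ fuel →
    PySem.Chars.splitOn.go ['\n'] fuel l cur accs = accs.reverse ++ glueL cur.reverse (splitNL l) := by
  intro fuel
  induction fuel with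
  | zero =>
    intro l cur accs hl
    have : l = [] := by cases l <;> simp_all
    subst this
    simp [PySem.Chars.splitOn.go, splitNL, glueL]
  | succ n ih =>
    intro l cur accs hl
    cases l with
    | nil => simp [PySem.Chars.splitOn.go, splitNL, glueL]
    | cons c t =>
      rw [PySem.Chars.splitOn.go]
      obtain ⟨r, rs, hsp⟩ := splitNL_cons t
      by_cases hc : c = '\n'
      · subst hc
        simp only [List.isPrefixOf_cons₂, beq_self_eq_true, List.isPrefixOf_nil_left,
          Bool.and_true, if_pos]
        rw [List.length_cons] at hl
        rw [ih _ _ _ (by simpa using Nat.le_of_succ_le_succ hl)]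
        simp [splitNL, hsp, glueL]
      · have hc' : (('\n' : Char) == c) = false := by
          simp only [beq_eq_false_iff_ne, ne_eq]
          exact fun e => hc e.symm
        simp only [List.isPrefixOf_cons₂, hc', Bool.false_and, Bool.false_eq_true, if_neg,
          not_false_eq_true]
        rw [List.length_cons] at hl
        rw [ih _ _ _ (Nat.le_of_succ_le_succ hl)]
        simp [splitNL, hc, hsp, glueL]

lemma splitOn_eq_splitNL (s : List Char) : PySem.Chars.splitOn s ['\n'] = splitNL s := by
  rw [PySem.Chars.splitOn, splitOn_go_eq (s.length + 1) s [] [] (Nat.le_succ _)]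
  obtain ⟨r, rs, hsp⟩ := splitNL_cons s
  simp [hsp, glueL]

lemma splitNL_nlfree (s : List Char) : ∀ l ∈ splitNL s, ('\n' : Char) ∉ l := by
  induction s with
  | nil => simp [splitNL]
  | cons c t ih =>
    obtain ⟨r, rs, hsp⟩ := splitNL_cons t
    by_cases hc : c = '\n'
    · subst hc
      simp only [splitNL]
      rw [if_pos trivial]
      intro l hl
      rcases List.mem_cons.mp hl with h | h
      · simp [h]
      · exact ih l h
    · simp only [splitNL, if_neg hc, hsp, glueL]
      intro l hl
      rcases List.mem_cons.mp hl with h | h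
      · subst h
        have hr := ih r (by rw [hsp]; exact List.mem_cons_self ..)
        intro hm
        simp only [List.cons_append, List.nil_append, List.mem_cons] at hm
        rcases hm with e | e
        · exact hc e.symm
        · exact hr e
      · exact ih l (by rw [hsp]; exact List.mem_cons_of_mem _ h)

lemma joinNL_cons_ne (a : List Char) (X : List (List Char)) (h : X ≠ []) :
    joinNL (a :: X) = a ++ '\n' :: joinNL X := by
  cases X with
  | nil => exact absurd rfl h
  | cons y ys => simp [joinNL]

lemma joinNL_splitNL (s : List Char) : joinNL (splitNL s) = s := by
  induction s with
  | nil => simp [splitNL, joinNL]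
  | cons c t ih =>
    obtain ⟨r, rs, hsp⟩ := splitNL_cons t
    by_cases hc : c = '\n'
    · subst hc
      simp only [splitNL]
      rw [if_pos trivial]
      rw [joinNL_cons_ne _ _ (splitNL_ne_nil t), ih]
      simp
    · simp only [splitNL, if_neg hc, hsp, glueL]
      cases rs with
      | nil =>
        rw [hsp] at ih
        simp only [joinNL] at ih ⊢
        simp [ih]
      | cons y ys =>
        rw [hsp, joinNL_cons_ne _ _ (by simp)] at ih
        rw [joinNL_cons_ne _ _ (by simp)]
        simp [← ih]

lemma join_eq_joinNL (ls : List (List Char)) : PySem.Chars.join ['\n'] ls = joinNL ls := by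
  rw [PySem.Chars.join]
  induction ls with
  | nil => simp [joinNL, List.intercalate]
  | cons l t ih =>
    cases t with
    | nil => simp [joinNL, List.intercalate, List.intersperse]
    | cons y ys =>
      rw [joinNL_cons_ne _ _ (by simp), ← ih]
      simp [List.intercalate, List.intersperse]

lemma gA_ne_nil (p : List Char) (ls : List (List Char)) : gA p ls ≠ [] := by
  cases ls with
  | nil => simp [gA]
  | cons h t =>
    simp only [gA]
    split <;> simp

lemma gA_cons (p : List Char) (ls : List (List Char)) : ∃ r rs, gA p ls = r :: rs := by
  cases h : gA p ls with
  | nil => exact absurd h (gA_ne_nil p ls)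
  | cons r rs => exact ⟨r, rs, rfl⟩

lemma loopA_eq : ∀ (ls : List (List Char)) (init : List (List Char)) (p : List Char),
    loopA ls (init ++ [p]) (p == ([] : List Char)) = init ++ gA p ls := by
  intro ls
  induction ls with
  | nil => intro init p; simp [loopA, gA]
  | cons l rest ih =>
    intro init p
    by_cases hp : p = ([] : List Char)
    · subst hp
      by_cases hs : PySem.Chars.startswith l ['#', ' '] = true
      · have h1 : ((init ++ [([] : List Char)]).isEmpty) = false := by
          simp [List.isEmpty_eq_false_iff]
        simp only [loopA, hs, beq_self_eq_true, Bool.true_and, Bool.and_true, h1,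
          Bool.not_false, List.getLast?_concat, List.dropLast_concat, if_pos, gA]
        have := ih (init ++ [markerL, []]) l
        simp only [List.append_assoc] at this ⊢
        simpa using this
      · have hs' : PySem.Chars.startswith l ['#', ' '] = false := by
          simpa using hs
        simp only [loopA, hs', Bool.false_and, Bool.false_eq_true, if_neg, not_false_eq_true, gA,
          beq_self_eq_true, Bool.and_true]
        have := ih (init ++ [([] : List Char)]) l
        simp only [List.append_assoc] at this ⊢
        simpa [hs'] using this
    · have hp' : (p == ([] : List Char)) = false := by simpa using hp
      simp only [loopA, hp', Bool.and_false, Bool.false_and, Bool.false_eq_true, if_neg,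
        not_false_eq_true, gA]
      have := ih (init ++ [p]) l
      simp only [List.append_assoc] at this ⊢
      simpa [hp'] using this

lemma loopA_start (l0 : List Char) (ls : List (List Char)) :
    loopA (l0 :: ls) [] false = gA l0 ls := by
  simp only [loopA, Bool.and_false, Bool.false_and, Bool.false_eq_true, if_neg, not_false_eq_true,
    List.isEmpty_nil, Bool.not_true, Bool.and_true]
  simpa using loopA_eq ls [] l0

lemma replace_go_chunk : ∀ (fuel : Nat) (l acc : List Char),
    l.length ≤ fuel →
    PySem.Chars.replace.go ['\n', '\n', '#', ' '] ('\n' :: markerL ++ ['\n', '\n', '#', ' ']) fuel l acc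
      = acc.reverse ++ repl l := by
  intro fuel
  induction fuel with
  | zero =>
    intro l acc hl
    have : l = [] := by cases l <;> simp_all
    subst this
    simp [PySem.Chars.replace.go, repl]
  | succ n ih =>
    intro l acc hl
    cases l with
    | nil => simp [PySem.Chars.replace.go, repl]
    | cons c t =>
      rw [PySem.Chars.replace.go]
      rw [List.length_cons] at hl
      cases hpre : ['\n', '\n', '#', ' '].isPrefixOf (c :: t) with
      | true =>
        rw [if_pos rfl]
        have hdrop : List.drop ['\n', '\n', '#', ' '].length (c :: t) = t.drop 3 := by
          simp
        rw [hdrop, ih (t.drop 3) _ (le_trans (by simpa using List.length_drop_le 3 t)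
          (Nat.le_of_succ_le_succ hl))]
        conv_rhs => rw [repl]
        rw [if_pos hpre]
        simp
      | false =>
        rw [if_neg (by simp)]
        rw [ih t _ (Nat.le_of_succ_le_succ hl)]
        simp [repl, hpre]

lemma replace_eq_repl (s : List Char) :
    PySem.Chars.replace s ['\n', '\n', '#', ' '] ('\n' :: markerL ++ ['\n', '\n', '#', ' ']) = repl s := by
  rw [PySem.Chars.replace]
  simp only [List.isEmpty_cons, Bool.false_eq_true, if_neg, not_false_eq_true]
  simpa using replace_go_chunk s.length s [] le_rfl

lemma nl_prefix_false {l : List Char} (h : ('\n' : Char) ∉ l) :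
    ['\n', '#', ' '].isPrefixOf l = false := by
  cases l with
  | nil => simp [List.isPrefixOf]
  | cons c t =>
    have hc : (('\n' : Char) == c) = false := by
      simp only [beq_eq_false_iff_ne, ne_eq]
      intro e
      exact h (e ▸ List.mem_cons_self ..)
    simp [List.isPrefixOf_cons₂, hc]

lemma repl_append_nlfree : ∀ (a b : List Char), ('\n' : Char) ∉ a → repl (a ++ b) = a ++ repl b := by
  intro a
  induction a with
  | nil => intro b _; simp
  | cons c a' ih =>
    intro b h
    have hc : (('\n' : Char) == c) = false := by
      simp only [beq_eq_false_iff_ne, ne_eq]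
      intro e
      exact h (e ▸ List.mem_cons_self ..)
    have hfire : (['\n', '\n', '#', ' '].isPrefixOf (c :: (a' ++ b))) = false := by
      simp [List.isPrefixOf_cons₂, hc]
    simp only [List.cons_append, repl, hfire, Bool.false_eq_true, if_neg,
      not_false_eq_true, List.cons.injEq, true_and]
    exact ih b (fun hm => h (List.mem_cons_of_mem _ hm))

lemma repl_nlfree (a : List Char) (h : ('\n' : Char) ∉ a) : repl a = a := by
  have := repl_append_nlfree a [] h
  simpa [repl] using this

lemma hashPrefix_joinNL (h : List Char) (t : List (List Char)) :
    ['#', ' '].isPrefixOf (joinNL (h :: t)) = ['#', ' '].isPrefixOf h := by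
  cases t with
  | nil => simp [joinNL]
  | cons x ts =>
    rw [joinNL_cons_ne _ _ (by simp)]
    cases h with
    | nil => simp [List.isPrefixOf_cons₂, List.isPrefixOf]
    | cons c1 h1 =>
      cases h1 with
      | nil => simp [List.isPrefixOf_cons₂, List.isPrefixOf]
      | cons c2 h2 => simp [List.isPrefixOf_cons₂]

lemma scanT : ∀ (n : Nat) (ls : List (List Char)), ls.length ≤ n → ls ≠ [] →
    (∀ l ∈ ls, ('\n' : Char) ∉ l) →
    repl ('\n' :: joinNL ls) = '\n' :: joinNL (GA ls) := by
  intro n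
  induction n with
  | zero =>
    intro ls h hne _
    cases ls with
    | nil => exact absurd rfl hne
    | cons l t => simp at h
  | succ n ih =>
    intro ls hlen hne hfree
    obtain ⟨l, t, rfl⟩ : ∃ l t, ls = l :: t := by
      cases ls with
      | nil => exact absurd rfl hne
      | cons l t => exact ⟨l, t, rfl⟩
    have hlfree : ('\n' : Char) ∉ l := hfree l (List.mem_cons_self ..)
    rw [List.length_cons] at hlen
    cases t with
    | nil =>
      have h1 : (['\n', '#', ' '].isPrefixOf l) = false := nl_prefix_false hlfree
      have hfire : (['\n', '\n', '#', ' '].isPrefixOf ('\n' :: l)) = false := by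
        simp [List.isPrefixOf_cons₂, h1]
      simp [joinNL, GA, gA, repl, hfire, repl_nlfree l hlfree]
    | cons h2 t2 =>
      have hfree2 : ('\n' : Char) ∉ h2 := hfree h2 (by simp)
      cases l with
      | cons c l' =>
        have hc : (('\n' : Char) == c) = false := by
          simp only [beq_eq_false_iff_ne, ne_eq]
          intro e
          exact hlfree (e ▸ List.mem_cons_self ..)
        rw [joinNL_cons_ne _ _ (by simp)]
        have hfire : (['\n', '\n', '#', ' '].isPrefixOf ('\n' :: c :: (l' ++ '\n' :: joinNL (h2 :: t2)))) = false := by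
          simp [List.isPrefixOf_cons₂, hc]
        rw [show ((c :: l') ++ '\n' :: joinNL (h2 :: t2)) =
          c :: (l' ++ '\n' :: joinNL (h2 :: t2)) by simp]
        rw [show repl ('\n' :: c :: (l' ++ '\n' :: joinNL (h2 :: t2)))
            = '\n' :: repl (c :: (l' ++ '\n' :: joinNL (h2 :: t2))) by rw [repl]; simp [hfire]]
        rw [show (c :: (l' ++ '\n' :: joinNL (h2 :: t2))) = ((c :: l') ++ '\n' :: joinNL (h2 :: t2)) by simp]
        rw [repl_append_nlfree _ _ hlfree]
        rw [ih (h2 :: t2) (by simpa using hlen) (by simp) (fun x hx => hfree x (List.mem_cons_of_mem _ hx))]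
        have hcne : ((c :: l') == ([] : List Char)) = false := by simp
        simp only [GA, gA, hcne, Bool.and_false, Bool.false_eq_true, if_neg, not_false_eq_true]
        obtain ⟨r, rs, hg⟩ := gA_cons h2 t2
        rw [hg]
        simp [joinNL_cons_ne]
      | nil =>
        rw [joinNL_cons_ne _ _ (by simp)]
        simp only [List.nil_append]
        by_cases hh : (['#', ' '].isPrefixOf h2) = true
        · obtain ⟨h3, rfl⟩ : ∃ h3, h2 = '#' :: ' ' :: h3 := by
            rw [List.isPrefixOf_iff_prefix] at hh
            obtain ⟨u, hu⟩ := hh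
            exact ⟨u, by simpa using hu.symm⟩
          have hstart : PySem.Chars.startswith ('#' :: ' ' :: h3) ['#', ' '] = true := by
            simp [PySem.Chars.startswith, List.isPrefixOf_cons₂]
          have h3free : ('\n' : Char) ∉ h3 := fun hm => hfree2 (by simp [hm])
          cases t2 with
          | nil =>
            simp only [joinNL]
            rw [show repl ('\n' :: '\n' :: '#' :: ' ' :: h3)
                = ('\n' :: markerL ++ ['\n', '\n', '#', ' ']) ++ repl h3 by
              rw [repl]; simp [List.isPrefixOf_cons₂]]
            rw [repl_nlfree h3 h3free]
            simp only [GA, gA, hstart, beq_self_eq_true, Bool.and_self, if_pos]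
            rw [joinNL_cons_ne _ _ (by simp), joinNL_cons_ne _ _ (by simp)]
            simp [joinNL]
          | cons x t3 =>
            rw [joinNL_cons_ne _ _ (by simp)]
            rw [show ('\n' :: (('#' :: ' ' :: h3) ++ '\n' :: joinNL (x :: t3)))
              = '\n' :: '#' :: ' ' :: (h3 ++ '\n' :: joinNL (x :: t3)) by simp]
            rw [show repl ('\n' :: '\n' :: '#' :: ' ' :: (h3 ++ '\n' :: joinNL (x :: t3)))
                = ('\n' :: markerL ++ ['\n', '\n', '#', ' ']) ++ repl (h3 ++ '\n' :: joinNL (x :: t3)) by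
              rw [repl]; simp [List.isPrefixOf_cons₂]]
            rw [repl_append_nlfree _ _ h3free]
            rw [ih (x :: t3) (by simp at hlen ⊢; omega) (by simp)
              (fun y hy => hfree y (List.mem_cons_of_mem _ (List.mem_cons_of_mem _ hy)))]
            simp only [GA, gA, hstart, beq_self_eq_true, Bool.and_self, if_pos]
            have hne2 : (('#' :: ' ' :: h3) == ([] : List Char)) = false := by simp
            simp only [hne2, Bool.and_false, Bool.false_eq_true, if_neg, not_false_eq_true]
            obtain ⟨r, rs, hg⟩ := gA_cons x t3
            rw [hg]
            simp [joinNL_cons_ne]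
        · have hh' : (['#', ' '].isPrefixOf h2) = false := Bool.eq_false_iff.mpr hh
          have hfire : (['\n', '\n', '#', ' '].isPrefixOf ('\n' :: '\n' :: joinNL (h2 :: t2))) = false := by
            simp [List.isPrefixOf_cons₂, hashPrefix_joinNL, hh']
          rw [show repl ('\n' :: '\n' :: joinNL (h2 :: t2))
              = '\n' :: repl ('\n' :: joinNL (h2 :: t2)) by rw [repl]; simp [hfire]]
          rw [ih (h2 :: t2) (by simpa using hlen) (by simp) (fun x hx => hfree x (List.mem_cons_of_mem _ hx))]
          have hstart' : PySem.Chars.startswith h2 ['#', ' '] = false := by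
            simp [PySem.Chars.startswith, hh']
          simp only [GA, gA, hstart', Bool.false_and, Bool.false_eq_true, if_neg, not_false_eq_true]
          obtain ⟨r, rs, hg⟩ := gA_cons h2 t2
          rw [hg]
          simp [joinNL_cons_ne]

lemma hash_gA (h2 : List Char) (t2 : List (List Char)) :
    ['#', ' '].isPrefixOf (joinNL (gA h2 t2)) = ['#', ' '].isPrefixOf h2 := by
  cases t2 with
  | nil => simp [gA, joinNL]
  | cons x t3 =>
    by_cases hc : (PySem.Chars.startswith x ['#', ' '] && (h2 == ([] : List Char))) = true
    · have hh2 : h2 = [] := by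
        simp only [Bool.and_eq_true, beq_iff_eq] at hc
        exact hc.2
      simp only [gA, hc, if_pos]
      rw [hashPrefix_joinNL markerL ([] :: gA x t3), hh2]
      simp [List.isPrefixOf, List.isPrefixOf_cons₂, markerL]
    · have hc' : (PySem.Chars.startswith x ['#', ' '] && (h2 == ([] : List Char))) = false := by
        simpa using hc
      simp only [gA, hc', Bool.false_eq_true, if_neg, not_false_eq_true]
      exact hashPrefix_joinNL h2 (gA x t3)

-- ===== VERDICT (by name: the statement is the Claim_ definition above) =====
theorem add_slide_markers_py_spec : Claim_equal_add_slide_markers_py := by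
  intro markdown _
  unfold Spec_add_slide_markers_py
  by_cases hm : markdown = ""
  · subst hm; decide
  · have hm' : (markdown == "") = false := by simpa using hm
    unfold add_slide_markers_py add_slide_markers_py_alt
    simp only [hm', Bool.false_eq_true, if_neg, not_false_eq_true]
    obtain ⟨l0, ls, hsp⟩ := splitNL_cons markdown.toList
    have hjoin : joinNL (l0 :: ls) = markdown.toList := by rw [← hsp, joinNL_splitNL]
    have hfree : ∀ l ∈ l0 :: ls, ('\n' : Char) ∉ l := by
      rw [← hsp]; exact splitNL_nlfree markdown.toList
    have hl0free : ('\n' : Char) ∉ l0 := hfree l0 (List.mem_cons_self ..)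
    rw [splitOn_eq_splitNL, hsp, loopA_start, join_eq_joinNL, replace_eq_repl, ← hjoin]
    congr 1
    cases ls with
    | nil =>
      simp only [joinNL]
      rw [repl_nlfree l0 hl0free]
      have : PySem.Chars.startswith l0 ['\n', '#', ' '] = false := by
        simp only [PySem.Chars.startswith]
        exact nl_prefix_false hl0free
      simp [this, gA, joinNL]
    | cons h2 t2 =>
      have hscan : repl ('\n' :: joinNL (h2 :: t2)) = '\n' :: joinNL (GA (h2 :: t2)) :=
        scanT (h2 :: t2).length _ le_rfl (by simp)
          (fun x hx => hfree x (List.mem_cons_of_mem _ hx))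
      cases l0 with
      | cons c l0' =>
        have hc : (('\n' : Char) == c) = false := by
          simp only [beq_eq_false_iff_ne, ne_eq]
          intro e
          exact hl0free (e ▸ List.mem_cons_self ..)
        rw [joinNL_cons_ne (c :: l0') (h2 :: t2) (by simp),
          repl_append_nlfree _ _ hl0free, hscan]
        have hsw : PySem.Chars.startswith (c :: (l0' ++ '\n' :: joinNL (GA (h2 :: t2)))) ['\n', '#', ' '] = false := by
          simp [PySem.Chars.startswith, List.isPrefixOf_cons₂, hc]
        rw [if_neg (by simp [hsw])]
        have hcne : ((c :: l0') == ([] : List Char)) = false := by simp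
        simp only [gA, hcne, Bool.and_false, Bool.false_eq_true, if_neg, not_false_eq_true]
        obtain ⟨r, rs, hg⟩ := gA_cons h2 t2
        rw [show GA (h2 :: t2) = gA h2 t2 from rfl, hg]
        simp [joinNL_cons_ne]
      | nil =>
        rw [joinNL_cons_ne ([]) (h2 :: t2) (by simp)]
        simp only [List.nil_append]
        rw [hscan]
        have hsw : PySem.Chars.startswith ('\n' :: joinNL (GA (h2 :: t2))) ['\n', '#', ' ']
            = ['#', ' '].isPrefixOf h2 := by
          simp only [PySem.Chars.startswith, List.isPrefixOf_cons₂, beq_self_eq_true, Bool.true_and,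
            show GA (h2 :: t2) = gA h2 t2 from rfl]
          exact hash_gA h2 t2
        by_cases hh : (['#', ' '].isPrefixOf h2) = true
        · rw [if_pos (by rw [hsw]; exact hh)]
          have hstart : PySem.Chars.startswith h2 ['#', ' '] = true := by
            simpa [PySem.Chars.startswith] using hh
          simp only [gA, hstart, beq_self_eq_true, Bool.and_self, if_pos]
          obtain ⟨r, rs, hg⟩ := gA_cons h2 t2
          rw [show GA (h2 :: t2) = gA h2 t2 from rfl, hg]
          simp [joinNL_cons_ne]
        · have hh' := Bool.eq_false_iff.mpr hh
          rw [if_neg (by rw [hsw]; simp [hh'])]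
          have hstart' : PySem.Chars.startswith h2 ['#', ' '] = false := by
            simpa [PySem.Chars.startswith] using hh'
          simp only [gA, hstart', Bool.false_and, Bool.false_eq_true, if_neg, not_false_eq_true]
          obtain ⟨r, rs, hg⟩ := gA_cons h2 t2
          rw [show GA (h2 :: t2) = gA h2 t2 from rfl, hg]
          simp [joinNL_cons_ne]
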